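-- pv_equiv track=rewrite | github.com/abhayalekal74/similar-questions | ngrams.py | get_trigrams
-- ===== SOURCE A (Python) =====
-- def get_trigrams(words):
-- 	if len(words) < 3:
-- 		return None
-- 	trigrams = []
-- 	for i in range(len(words) - 2):
-- 		for j in range(i + 1, len(words) - 1):
-- 			for k in range(j + 1, len(words)):
-- 				trigrams.append([words[i], words[j], words[k]])
-- 	return trigrams
-- ===== SOURCE B (Python) =====
-- def get_trigrams(words):
--     n = len(words)
--     if n < 3:
--         return None
--     results = []
--
--     def helper(start, remaining, prefix):
--         if remaining == 0:
--             results.append(prefix)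
--             return
--         for i in range(start, n):
--             helper(i + 1, remaining - 1, prefix + [words[i]])
--
--     helper(0, 3, [])
--     return results
-- ===== Notes on version B (the rewrite author's own statement) =====
-- stated objective: alternative
-- what changed: Replaced the fixed triple nested loop with the standard recursive k-combinations generator helper(start, remaining, prefix) called with remaining=3, extending the prefix on each recursive call.
import Mathlib
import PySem

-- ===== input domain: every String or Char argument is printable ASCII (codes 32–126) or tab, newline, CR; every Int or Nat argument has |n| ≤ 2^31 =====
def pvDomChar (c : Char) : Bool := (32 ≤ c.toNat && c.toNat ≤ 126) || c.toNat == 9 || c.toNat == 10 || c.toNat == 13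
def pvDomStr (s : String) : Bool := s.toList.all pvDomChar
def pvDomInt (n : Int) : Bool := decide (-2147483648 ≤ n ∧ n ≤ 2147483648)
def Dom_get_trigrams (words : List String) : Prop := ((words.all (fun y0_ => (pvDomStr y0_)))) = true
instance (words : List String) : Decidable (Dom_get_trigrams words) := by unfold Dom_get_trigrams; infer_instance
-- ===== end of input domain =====

-- B replaces A's fixed triple nested loop by the standard recursive k-combinations
-- backtracking generator (same output, same cost): objective 'alternative'.

-- ===== PORT A =====
-- indices i,j,k are always in range, so the default "" of pyGetD is never used (exact port of words[i])
def get_trigrams (words : List String) : Option (List (List String)) :=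
  if words.length < 3 then none
  else
    some ((PySem.List.pyRange 0 ((words.length : Int) - 2) 1).foldl (fun acc i =>
      (PySem.List.pyRange (i + 1) ((words.length : Int) - 1) 1).foldl (fun acc2 j =>
        (PySem.List.pyRange (j + 1) (words.length : Int) 1).foldl (fun acc3 k =>
          acc3 ++ [[PySem.List.pyGetD words i "", PySem.List.pyGetD words j "",
                    PySem.List.pyGetD words k ""]]) acc2) acc) [])

-- ===== PORT B =====
-- helper(start, remaining, prefix) from Source B; the mutable results list becomes the fold
-- accumulator, and remaining == 0 appends prefix, i.e. returns [pre]
def combHelper (words : List String) : Nat → Int → List String → List (List String)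
  | 0, _, pre => [pre]
  | r + 1, start, pre =>
    (PySem.List.pyRange start (words.length : Int) 1).foldl
      (fun acc i => acc ++ combHelper words r (i + 1) (pre ++ [PySem.List.pyGetD words i ""])) []

def get_trigrams_alt (words : List String) : Option (List (List String)) :=
  if words.length < 3 then none else some (combHelper words 3 0 [])

-- ===== PRECONDITION & SPEC =====
def Spec_get_trigrams (words : List String) (out : Option (List (List String))) : Prop := out = get_trigrams_alt words
instance (words : List String) (out : Option (List (List String))) : Decidable (Spec_get_trigrams words out) := by unfold Spec_get_trigrams; infer_instance

-- ===== CLAIM (what is proved, stated in full; the proofs are below) =====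
def Claim_equal_get_trigrams : Prop := ∀ (words : List String), Dom_get_trigrams words → Spec_get_trigrams words (get_trigrams words)

-- ===== LEMMAS AND PROOFS =====

theorem map_eq_flatMap_singleton {α β : Type} (l : List α) (f : α → β) :
    l.map f = l.flatMap (fun x => [f x]) := by
  induction l with
  | nil => rfl
  | cons a t ih => simp [ih]

theorem comb_succ (w : List String) (r : Nat) (s : Int) (p : List String) :
    combHelper w (r + 1) s p =
      (PySem.List.pyRange s (w.length : Int) 1).flatMap
        (fun i => combHelper w r (i + 1) (p ++ [PySem.List.pyGetD w i ""])) := by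
  simp [combHelper, List.flatMap_def]

-- for a start index ≥ n-2, the two remaining levels of B's recursion produce nothing
theorem comb2_nil (w : List String) (s : Int) (p : List String)
    (h : (w.length : Int) - 2 ≤ s - 1) :
    combHelper w 2 s p = [] := by
  rw [comb_succ]
  rw [List.flatMap_eq_nil_iff]
  intro x hx
  rw [PySem.List.mem_pyRange_one] at hx
  rw [comb_succ]
  rw [PySem.List.pyRange_one_eq_nil (by omega)]
  simp

theorem get_trigrams_spec' (words : List String) :
    get_trigrams words = get_trigrams_alt words := by
  unfold get_trigrams get_trigrams_alt
  by_cases h : words.length < 3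
  · simp [h]
  · simp only [h, if_false]
    congr 1
    have hn : (3 : Int) ≤ (words.length : Int) := by exact_mod_cast Nat.le_of_not_lt h
    set n : Int := (words.length : Int) with hn_def
    -- A side to flatMap/map form
    simp only [PySem.List.foldl_append_singleton_eq_map, PySem.List.foldl_append_eq_flatMap,
      List.nil_append]
    -- B side to flatMap/map form
    rw [comb_succ]
    -- split B's outer range at n-2 and drop the empty tail
    rw [PySem.List.pyRange_one_append 0 (n - 2) n (by omega) (by omega), List.flatMap_append]
    have htail : (PySem.List.pyRange (n - 2) n 1).flatMap
        (fun i => combHelper words 2 (i + 1) ([] ++ [PySem.List.pyGetD words i ""])) = [] := by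
      rw [List.flatMap_eq_nil_iff]
      intro i hi
      rw [PySem.List.mem_pyRange_one] at hi
      exact comb2_nil words (i + 1) _ (by omega)
    rw [htail, List.append_nil]
    apply List.flatMap_congr
    intro i hi
    rw [PySem.List.mem_pyRange_one] at hi
    rw [comb_succ]
    -- split B's middle range at n-1 and drop the empty last step
    have hsplit : PySem.List.pyRange (i + 1) n 1 =
        PySem.List.pyRange (i + 1) (n - 1) 1 ++ [n - 1] := by
      have h2 : (i : Int) + 1 ≤ n - 1 := by omega
      have := PySem.List.pyRange_one_succ_right h2
      rw [show n - 1 + 1 = n by ring] at this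
      exact this
    rw [hsplit, List.flatMap_append]
    have hlast : ([n - 1] : List Int).flatMap
        (fun j => combHelper words 1 (j + 1)
          ([] ++ [PySem.List.pyGetD words i ""] ++ [PySem.List.pyGetD words j ""])) = [] := by
      simp only [List.flatMap_cons, List.flatMap_nil, List.append_nil]
      rw [comb_succ]
      rw [PySem.List.pyRange_one_eq_nil (by omega)]
      simp
    rw [hlast, List.append_nil]
    apply List.flatMap_congr
    intro j hj
    rw [PySem.List.mem_pyRange_one] at hj
    rw [comb_succ]
    simp only [combHelper, List.nil_append, ← hn_def]
    exact map_eq_flatMap_singleton _ _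

-- ===== VERDICT (by name: the statement is the Claim_ definition above) =====
theorem get_trigrams_spec : Claim_equal_get_trigrams := by
  intro words _
  unfold Spec_get_trigrams
  exact get_trigrams_spec' words
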